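-- pv_equiv track=rewrite | github.com/fabian415/openclaw-skills | meeting-transcription/whiperx_docker/scripts/transcribe_diarize.py | normalize_speaker_labels
-- ===== SOURCE A (Python) =====
-- def normalize_speaker_labels(segments: list, name_map: dict = None) -> dict:
--     """
--     將 Pyannote 原始語者 ID（如 SPEAKER_00）映射為顯示名稱。
--
--     優先順序：
--       1. name_map 中有的 → 使用已註冊的 Speaker 名稱（e.g. "Alice"）
--       2. 其餘 → 依首次出現順序編號（"Speaker 1", "Speaker 2", ...）
--
--     Args:
--         segments: WhisperX 輸出的 segments list，每段含 "speaker" 欄位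
--         name_map: 聲紋比對結果 {SPEAKER_00: "Alice"}（可選）
--     """
--     mapping = {}
--     counter = 1
--     for seg in segments:
--         raw = seg.get("speaker", "UNKNOWN")
--         if raw not in mapping:
--             if name_map and raw in name_map:
--                 mapping[raw] = name_map[raw]
--             else:
--                 mapping[raw] = f"Speaker {counter}"
--                 counter += 1
--     return mapping
-- ===== SOURCE B (Python) =====
-- def normalize_speaker_labels(segments: list, name_map: dict = None) -> dict:
--     def lookup(u):
--         return name_map.get(u) if name_map else None
--     uniques = list(dict.fromkeys(seg.get("speaker", "UNKNOWN") for seg in segments))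
--     rank = {u: i + 1 for i, u in enumerate(u for u in uniques if lookup(u) is None)}
--     def display(u):
--         v = lookup(u)
--         return v if v is not None else f"Speaker {rank[u]}"
--     return {u: display(u) for u in uniques}
-- ===== Notes on version B (the rewrite author's own statement) =====
-- stated objective: alternative
-- what changed: Replaces A's stateful scan (membership test against the partially built mapping plus a running counter mutated inside the loop) by a stateless pipeline with no accumulator at all: dedup the raw IDs, compute each unnamed ID's number as its rank in the filtered unique list via an enumerate-built table, and emit the mapping as a single comprehension.
import Mathlib
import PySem

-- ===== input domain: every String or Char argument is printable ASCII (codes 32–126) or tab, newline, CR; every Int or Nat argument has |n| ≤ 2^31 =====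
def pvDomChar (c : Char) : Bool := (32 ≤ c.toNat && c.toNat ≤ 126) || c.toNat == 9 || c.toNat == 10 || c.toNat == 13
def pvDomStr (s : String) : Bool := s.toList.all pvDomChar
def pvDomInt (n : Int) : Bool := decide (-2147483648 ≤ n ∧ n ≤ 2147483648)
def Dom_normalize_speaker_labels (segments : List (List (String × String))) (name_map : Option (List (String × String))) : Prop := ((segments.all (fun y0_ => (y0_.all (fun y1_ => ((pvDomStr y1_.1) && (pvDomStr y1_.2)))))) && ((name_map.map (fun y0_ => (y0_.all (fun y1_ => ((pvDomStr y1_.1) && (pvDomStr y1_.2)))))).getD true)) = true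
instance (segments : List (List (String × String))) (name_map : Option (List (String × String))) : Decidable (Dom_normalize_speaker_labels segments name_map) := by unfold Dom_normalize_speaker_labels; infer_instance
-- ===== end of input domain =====

-- B replaces A's stateful scan (membership test against the partly built mapping + a running
-- counter) by a stateless pipeline: dedup, rank the unnamed IDs via an enumerate-built table,
-- emit the mapping as one comprehension (objective: alternative decomposition, same cost).

-- ===== PORT A =====
-- shared lookup helper: Python 'name_map and raw in name_map' (truthiness: non-None AND nonempty),
-- value name_map[raw]; B's Source B 'name_map.get(u) if name_map else None' is the same function
def pvNmGet (name_map : Option (List (String × String))) (raw : String) : Option String :=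
  match name_map with
  | none => none
  | some nm => if nm.isEmpty then none else (PySem.Dict.mk nm).get? raw

def normalize_speaker_labels (segments : List (List (String × String))) (name_map : Option (List (String × String))) : List (String × String) :=
  let st := segments.foldl (fun (st : PySem.Dict String String × Int) seg =>
      let raw := (PySem.Dict.mk seg).getD "speaker" "UNKNOWN"
      if st.1.contains raw then st
      else
        match pvNmGet name_map raw with
        | some v => (st.1.insert raw v, st.2)
        | none => (st.1.insert raw ("Speaker " ++ PySem.Int.toStr st.2), st.2 + 1))
    (PySem.Dict.mk [], 1)
  st.1.items

-- ===== PORT B =====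
-- rank[u] is ported as (rank.get? u).getD 0: in Source B the key is always present when read
-- (display only reads rank[u] for unnamed u, and every unnamed unique is in rank), so no
-- KeyError arises and the default is never used; uniques is duplicate-free, so Dict.mk of
-- the comprehension's pair list has Python's dict-comprehension semantics.
def normalize_speaker_labels_alt (segments : List (List (String × String))) (name_map : Option (List (String × String))) : List (String × String) :=
  let uniques := PySem.List.dedup (segments.map (fun seg => (PySem.Dict.mk seg).getD "speaker" "UNKNOWN"))
  let rank := PySem.Dict.mk ((PySem.List.enumerate (uniques.filter (fun u => (pvNmGet name_map u).isNone))).map (fun p => (p.2, p.1 + 1)))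
  uniques.map (fun u =>
    (u, match pvNmGet name_map u with
        | some v => v
        | none => "Speaker " ++ PySem.Int.toStr ((rank.get? u).getD 0)))

-- ===== PRECONDITION & SPEC =====
def Spec_normalize_speaker_labels (segments : List (List (String × String))) (name_map : Option (List (String × String))) (out : List (String × String)) : Prop := out = normalize_speaker_labels_alt segments name_map
instance (segments : List (List (String × String))) (name_map : Option (List (String × String))) (out : List (String × String)) : Decidable (Spec_normalize_speaker_labels segments name_map out) := by unfold Spec_normalize_speaker_labels; infer_instance

-- ===== CLAIM (what is proved, stated in full; the proofs are below) =====
def Claim_equal_normalize_speaker_labels : Prop := ∀ (segments : List (List (String × String))) (name_map : Option (List (String × String))), Dom_normalize_speaker_labels segments name_map → Spec_normalize_speaker_labels segments name_map (normalize_speaker_labels segments name_map)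

-- ===== LEMMAS AND PROOFS =====

-- A's loop body on a not-yet-seen ID
def pvStep (name_map : Option (List (String × String))) (st : PySem.Dict String String × Int) (raw : String) : PySem.Dict String String × Int :=
  match pvNmGet name_map raw with
  | some v => (st.1.insert raw v, st.2)
  | none => (st.1.insert raw ("Speaker " ++ PySem.Int.toStr st.2), st.2 + 1)

-- the elements of raws that are new relative to the already-seen set s, deduplicated, in order
def pvNew (s : List String) : List String → List String
  | [] => []
  | r :: rs => if r ∈ s then pvNew s rs else r :: pvNew (s ++ [r]) rs

-- the (id, display-name) pairs A's loop emits from counter c over a duplicate-free id list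
def pvVal (name_map : Option (List (String × String))) (c : Int) : List String → List (String × String)
  | [] => []
  | r :: rs =>
    match pvNmGet name_map r with
    | some v => (r, v) :: pvVal name_map c rs
    | none => (r, "Speaker " ++ PySem.Int.toStr c) :: pvVal name_map (c + 1) rs

theorem pvUpdate_eq_append_pvNew (raws : List String) : ∀ (s : PySem.Set String),
    PySem.Set.update s raws = s ++ pvNew s raws := by
  induction raws with
  | nil => intro s; simp [pvNew, PySem.Set.update_nil]
  | cons r rs ih =>
    intro s
    rw [PySem.Set.update_cons]
    by_cases h : r ∈ s
    · rw [PySem.Set.add_of_mem h, ih]; simp [pvNew, h]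
    · rw [PySem.Set.add_of_not_mem h, ih]; simp [pvNew, h]

theorem pvDedup_eq_pvNew (raws : List String) : PySem.List.dedup raws = pvNew [] raws := by
  have h := pvUpdate_eq_append_pvNew raws []
  rw [PySem.Set.update_nil_left] at h
  simpa [PySem.List.dedup] using h

-- A's skipping fold over the raw IDs equals the plain fold over the not-yet-seen dedup of the raw IDs
theorem pvFold_eq (name_map : Option (List (String × String))) (raws : List String) :
    ∀ (st : PySem.Dict String String × Int) (s : PySem.Set String),
    (∀ r : String, st.1.contains r = true ↔ r ∈ s) →
    raws.foldl (fun st raw => if st.1.contains raw then st else pvStep name_map st raw) st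
      = (pvNew s raws).foldl (pvStep name_map) st := by
  induction raws with
  | nil => intro st s _; rfl
  | cons r rs ih =>
    intro st s hcs
    by_cases h : r ∈ s
    · have hd : st.1.contains r = true := (hcs r).mpr h
      simp only [List.foldl_cons, pvNew, h, if_pos, hd]
      exact ih st s hcs
    · have hd : st.1.contains r = false := by
        rw [Bool.eq_false_iff]; intro hc; exact h ((hcs r).mp hc)
      simp only [List.foldl_cons, pvNew, h, if_neg, hd, Bool.false_eq_true, not_false_eq_true]
      apply ih
      intro x
      have hins : ∀ (d : PySem.Dict String String) (v : String),
          (d.insert r v).contains x = (x == r || d.contains x) :=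
        fun d v => PySem.Dict.contains_insert d r x v
      cases hm : pvNmGet name_map r with
      | some v =>
        simp only [pvStep, hm, hins, Bool.or_eq_true, beq_iff_eq, hcs, List.mem_append,
          List.mem_singleton]
        tauto
      | none =>
        simp only [pvStep, hm, hins, Bool.or_eq_true, beq_iff_eq, hcs, List.mem_append,
          List.mem_singleton]
        tauto

-- the plain fold over a duplicate-free, all-fresh id list appends exactly pvVal
theorem pvFold_items (name_map : Option (List (String × String))) (L : List String) :
    ∀ (d : PySem.Dict String String) (c : Int), L.Nodup →
    (∀ r ∈ L, d.contains r = false) →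
    (L.foldl (pvStep name_map) (d, c)).1.items = d.items ++ pvVal name_map c L := by
  induction L with
  | nil => intro d c _ _; simp [pvVal]
  | cons r rs ih =>
    intro d c hnd hf
    have hdr : d.contains r = false := hf r (List.mem_cons_self ..)
    have hfresh : ∀ (v : String), ∀ x ∈ rs, (d.insert r v).contains x = false := by
      intro v x hx
      rw [PySem.Dict.contains_insert]
      have hxr : x ≠ r := fun he => (List.nodup_cons.mp hnd).1 (he ▸ hx)
      simp [hxr, hf x (List.mem_cons_of_mem _ hx)]
    cases hm : pvNmGet name_map r with
    | some v =>
      simp only [List.foldl_cons, pvStep, hm, pvVal]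
      rw [ih _ _ (List.nodup_cons.mp hnd).2 (hfresh v),
        PySem.Dict.items_insert_of_not_contains (h := hdr)]
      simp
    | none =>
      simp only [List.foldl_cons, pvStep, hm, pvVal]
      rw [ih _ _ (List.nodup_cons.mp hnd).2 (hfresh _),
        PySem.Dict.items_insert_of_not_contains (h := hdr)]
      simp

-- lookup in the enumerate-built rank table = 1 + index in the filtered list
theorem pvRank_get (F : List String) : ∀ (s : Int), F.Nodup → ∀ u ∈ F,
    (PySem.Dict.mk ((PySem.List.enumerate F s).map (fun p => (p.2, p.1 + 1)))).get? u
      = some (s + (F.idxOf u : Int) + 1) := by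
  induction F with
  | nil => intro s _ u hu; cases hu
  | cons f fs ih =>
    intro s hnd u hu
    rw [PySem.List.enumerate_cons]
    simp only [List.map_cons]
    rw [PySem.Dict.get?_mk_cons]
    by_cases he : f = u
    · subst he; simp [List.idxOf_cons_self]
    · have hu' : u ∈ fs := by cases hu with
        | head => exact absurd rfl he
        | tail _ h => exact h
      have hbe : (f == u) = false := by simp [he]
      rw [hbe, if_neg (by simp), ih (s + 1) (List.nodup_cons.mp hnd).2 u hu']
      have : fs.idxOf u + 1 = (f :: fs).idxOf u := by
        rw [List.idxOf_cons_ne _ (by simpa using he)]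
      rw [← this]
      push_cast
      ring_nf
-- pvVal from counter c = map with rank c + index-in-filtered
theorem pvVal_eq_map (name_map : Option (List (String × String))) (L : List String) :
    ∀ (c : Int), L.Nodup →
    pvVal name_map c L = L.map (fun u =>
      (u, match pvNmGet name_map u with
          | some v => v
          | none => "Speaker " ++ PySem.Int.toStr
              (c + ((L.filter (fun u => (pvNmGet name_map u).isNone)).idxOf u : Int)))) := by
  induction L with
  | nil => intro c _; rfl
  | cons r rs ih =>
    intro c hnd
    cases hm : pvNmGet name_map r with
    | some v =>
      have hflt : (r :: rs).filter (fun u => (pvNmGet name_map u).isNone)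
          = rs.filter (fun u => (pvNmGet name_map u).isNone) := by
        simp [hm]
      simp only [pvVal, hm, List.map_cons, hflt]
      rw [ih c (List.nodup_cons.mp hnd).2]
    | none =>
      have hflt : (r :: rs).filter (fun u => (pvNmGet name_map u).isNone)
          = r :: rs.filter (fun u => (pvNmGet name_map u).isNone) := by
        simp [hm]
      simp only [pvVal, hm, List.map_cons, hflt, List.idxOf_cons_self, Nat.cast_zero, add_zero]
      refine congrArg₂ List.cons rfl ?_
      rw [ih (c + 1) (List.nodup_cons.mp hnd).2]
      apply List.map_congr_left
      intro u hu
      cases hmu : pvNmGet name_map u with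
      | some v => simp
      | none =>
        have hur : r ≠ u := fun he => (List.nodup_cons.mp hnd).1 (he ▸ hu)
        rw [List.idxOf_cons_ne _ (by simpa using hur)]
        push_cast
        ring_nf

-- ===== VERDICT (by name: the statement is the Claim_ definition above) =====
theorem normalize_speaker_labels_spec : Claim_equal_normalize_speaker_labels := by
  intro segments name_map _
  unfold Spec_normalize_speaker_labels normalize_speaker_labels normalize_speaker_labels_alt
  set raws := segments.map (fun seg => (PySem.Dict.mk seg).getD "speaker" "UNKNOWN") with hraws
  have hAfold : segments.foldl
      (fun (st : PySem.Dict String String × Int) seg =>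
        let raw := (PySem.Dict.mk seg).getD "speaker" "UNKNOWN"
        if st.1.contains raw then st
        else
          match pvNmGet name_map raw with
          | some v => (st.1.insert raw v, st.2)
          | none => (st.1.insert raw ("Speaker " ++ PySem.Int.toStr st.2), st.2 + 1))
      (PySem.Dict.mk [], 1)
      = (PySem.List.dedup raws).foldl (pvStep name_map) (PySem.Dict.mk [], 1) := by
    calc segments.foldl
          (fun (st : PySem.Dict String String × Int) seg =>
            let raw := (PySem.Dict.mk seg).getD "speaker" "UNKNOWN"
            if st.1.contains raw then st
            else
              match pvNmGet name_map raw with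
              | some v => (st.1.insert raw v, st.2)
              | none => (st.1.insert raw ("Speaker " ++ PySem.Int.toStr st.2), st.2 + 1))
          (PySem.Dict.mk [], 1)
        = raws.foldl (fun st raw => if st.1.contains raw then st else pvStep name_map st raw)
            (PySem.Dict.mk [], 1) := by
          rw [hraws, List.foldl_map]; rfl
      _ = (pvNew [] raws).foldl (pvStep name_map) (PySem.Dict.mk [], 1) := by
          apply pvFold_eq
          intro r
          simp [PySem.Dict.contains]
      _ = (PySem.List.dedup raws).foldl (pvStep name_map) (PySem.Dict.mk [], 1) := by
          rw [pvDedup_eq_pvNew]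
  rw [hAfold]
  have hnd : (PySem.List.dedup raws).Nodup := PySem.List.nodup_dedup raws
  rw [pvFold_items name_map _ _ _ hnd (by intro r _; simp [PySem.Dict.contains]),
    pvVal_eq_map name_map _ 1 hnd]
  simp only [List.nil_append]
  apply List.map_congr_left
  intro u hu
  cases hm : pvNmGet name_map u with
  | some v => simp
  | none =>
    have huf : u ∈ (PySem.List.dedup raws).filter (fun u => (pvNmGet name_map u).isNone) := by
      rw [List.mem_filter]; exact ⟨hu, by simp [hm]⟩
    rw [pvRank_get _ 0 (List.Nodup.filter _ hnd) u huf]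
    simp only [Option.getD_some, zero_add]
    rw [Int.add_comm]
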